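-- pv_equiv track=rewrite | github.com/rahulmehta25/Retrieval-Augmented-Generation-for-LLMs-A-Survey | src/retrieval/context_compressor.py | _simple_compression
-- ===== SOURCE A (Python) =====
-- from typing import List, Dict, Any
--
-- def _simple_compression(context: List[str], max_tokens: int) -> List[str]:
--     """
--     Simple compression that takes the first segments until token limit.
--     """
--     compressed_context = []
--     current_tokens = 0
--
--     for segment in context:
--         segment_tokens = len(segment) // 4  # Rough estimation
--         if current_tokens + segment_tokens <= max_tokens:
--             compressed_context.append(segment)
--             current_tokens += segment_tokens
--         else:
--             break
--
--     return compressed_context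
-- ===== SOURCE B (Python) =====
-- from typing import List
--
-- def _simple_compression(context: List[str], max_tokens: int) -> List[str]:
--     # Prefix-sum table: prefix[k] = estimated tokens of the first k segments.
--     prefix = [0]
--     for segment in context:
--         prefix.append(prefix[-1] + len(segment) // 4)
--     # prefix is non-decreasing (token counts are >= 0), so binary-search the
--     # largest k with prefix[k] <= max_tokens and return that prefix of segments.
--     lo, hi = 0, len(context)
--     while lo < hi:
--         mid = (lo + hi + 1) // 2
--         if prefix[mid] <= max_tokens:
--             lo = mid
--         else:
--             hi = mid - 1
--     return context[:lo]
-- ===== Notes on version B (the rewrite author's own statement) =====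
-- stated objective: alternative
-- what changed: Builds a prefix-sum table of token estimates and binary-searches the largest prefix length within budget, instead of A's running-counter loop with a break.
import Mathlib
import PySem

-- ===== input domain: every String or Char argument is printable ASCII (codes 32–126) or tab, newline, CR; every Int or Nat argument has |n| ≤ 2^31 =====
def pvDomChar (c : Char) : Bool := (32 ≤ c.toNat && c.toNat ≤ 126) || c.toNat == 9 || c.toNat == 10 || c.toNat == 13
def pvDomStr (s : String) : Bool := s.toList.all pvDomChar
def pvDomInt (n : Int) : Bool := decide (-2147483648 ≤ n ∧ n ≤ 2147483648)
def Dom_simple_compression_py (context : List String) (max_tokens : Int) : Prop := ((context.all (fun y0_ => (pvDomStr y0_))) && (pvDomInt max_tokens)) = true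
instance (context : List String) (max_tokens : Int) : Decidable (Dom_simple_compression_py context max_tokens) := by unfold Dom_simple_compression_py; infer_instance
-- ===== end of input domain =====

-- B replaces A's running-counter break loop by a prefix-sum table of token estimates
-- plus a binary search for the largest affordable prefix length (objective: alternative).


-- ===== PORT A =====
-- A's loop: running token counter, append while within budget, break otherwise.
def pvGoA (max_tokens : Int) : List String → Int → List String
  | [], _ => []
  | segment :: rest, current_tokens =>
    let segment_tokens := PySem.Int.floordiv (PySem.Str.len segment) 4
    if current_tokens + segment_tokens ≤ max_tokens then
      segment :: pvGoA max_tokens rest (current_tokens + segment_tokens)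
    else []

def simple_compression_py (context : List String) (max_tokens : Int) : List String :=
  pvGoA max_tokens context 0

-- ===== PORT B =====
-- B's first pass: the appends of `for segment in context: prefix.append(prefix[-1] + len(segment)//4)`,
-- carrying prefix[-1] as the accumulator.
def pvPrefixGo : List String → Int → List Int
  | [], _ => []
  | segment :: rest, acc =>
    let t := acc + PySem.Int.floordiv (PySem.Str.len segment) 4
    t :: pvPrefixGo rest t

-- prefix = [0] followed by the appended running sums
def pvPrefixB (context : List String) : List Int :=
  0 :: pvPrefixGo context 0

-- B's while-loop: `lo` and `hi` stay in 0..len(context) in Python, so Nat is exact;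
-- `(lo + hi + 1) // 2` on those nonnegative values is Nat division; `prefix[mid]` is
-- always in range (mid ≤ len(context) < len(prefix)), so getD is exact there.
def pvBS (pre : List Int) (max_tokens : Int) (lo hi : Nat) : Nat :=
  if lo < hi then
    let mid := (lo + hi + 1) / 2
    if pre.getD mid 0 ≤ max_tokens then pvBS pre max_tokens mid hi
    else pvBS pre max_tokens lo (mid - 1)
  else lo
termination_by hi - lo
decreasing_by all_goals omega

-- `context[:lo]` with 0 ≤ lo ≤ len(context) is exactly take lo
def simple_compression_py_alt (context : List String) (max_tokens : Int) : List String :=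
  let pre := pvPrefixB context
  context.take (pvBS pre max_tokens 0 context.length)

-- ===== PRECONDITION & SPEC =====
def Spec_simple_compression_py (context : List String) (max_tokens : Int) (out : List String) : Prop := out = simple_compression_py_alt context max_tokens
instance (context : List String) (max_tokens : Int) (out : List String) : Decidable (Spec_simple_compression_py context max_tokens out) := by unfold Spec_simple_compression_py; infer_instance

-- ===== CLAIM (what is proved, stated in full; the proofs are below) =====
def Claim_equal_simple_compression_py : Prop := ∀ (context : List String) (max_tokens : Int), Dom_simple_compression_py context max_tokens → Spec_simple_compression_py context max_tokens (simple_compression_py context max_tokens)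

-- ===== LEMMAS AND PROOFS =====

-- token estimate of a segment; it is nonnegative
def pvTok (s : String) : Int := PySem.Int.floordiv (PySem.Str.len s) 4

theorem pvTok_nonneg (s : String) : 0 ≤ pvTok s := by
  have h : (0:Int) ≤ PySem.Str.len s := by
    simp [PySem.Str.len_eq]
  unfold pvTok
  rw [PySem.Int.floordiv_eq_ediv_of_pos (by norm_num)]
  exact Int.ediv_nonneg h (by norm_num)

-- the prefix table with a general starting accumulator
def pvQ (cur : Int) (ctx : List String) : List Int := cur :: pvPrefixGo ctx cur

theorem pvQ_cons (cur : Int) (s : String) (rest : List String) :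
    pvQ cur (s :: rest) = cur :: pvQ (cur + pvTok s) rest := by
  simp [pvQ, pvPrefixGo, pvTok]

-- value of the prefix table at index 0
theorem pvQ_getD_zero (cur : Int) (ctx : List String) : (pvQ cur ctx).getD 0 0 = cur := by
  cases ctx <;> rfl

-- monotonicity of the prefix table (within its length)
theorem pvQ_mono (ctx : List String) : ∀ (cur : Int) (i j : Nat), i ≤ j → j ≤ ctx.length →
    (pvQ cur ctx).getD i 0 ≤ (pvQ cur ctx).getD j 0 := by
  induction ctx with
  | nil =>
    intro cur i j hij hj
    have hi0 : i = 0 := by simp at hj; omega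
    have hj0 : j = 0 := by simp at hj; omega
    subst hi0; subst hj0; exact le_refl _
  | cons s rest ih =>
    intro cur i j hij hj
    rw [pvQ_cons]
    match i, j with
    | 0, 0 => exact le_refl _
    | 0, j + 1 =>
      simp only [List.getD_cons_zero, List.getD_cons_succ]
      have h1 := ih (cur + pvTok s) 0 j (Nat.zero_le _) (by simpa using hj)
      rw [pvQ_getD_zero] at h1
      have ht := pvTok_nonneg s
      omega
    | i + 1, j + 1 =>
      simp only [List.getD_cons_succ]
      exact ih (cur + pvTok s) i j (by omega) (by simpa using hj)

-- A's number of taken segments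
def pvCnt (max_tokens : Int) : List String → Int → Nat
  | [], _ => 0
  | segment :: rest, current_tokens =>
    if current_tokens + pvTok segment ≤ max_tokens then
      pvCnt max_tokens rest (current_tokens + pvTok segment) + 1
    else 0

theorem pvGoA_take (m : Int) (ctx : List String) : ∀ cur, pvGoA m ctx cur = ctx.take (pvCnt m ctx cur) := by
  induction ctx with
  | nil => intro cur; rfl
  | cons s rest ih =>
    intro cur
    simp only [pvGoA, pvCnt, pvTok]
    split <;> simp [ih]

theorem pvCnt_le (m : Int) (ctx : List String) : ∀ cur, pvCnt m ctx cur ≤ ctx.length := by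
  induction ctx with
  | nil => intro cur; simp [pvCnt]
  | cons s rest ih =>
    intro cur
    simp only [pvCnt]
    split
    · simpa using Nat.succ_le_succ (ih _)
    · simp

theorem pvCnt_good (m : Int) (ctx : List String) : ∀ cur, pvCnt m ctx cur = 0 ∨
    (pvQ cur ctx).getD (pvCnt m ctx cur) 0 ≤ m := by
  induction ctx with
  | nil => intro cur; left; rfl
  | cons s rest ih =>
    intro cur
    by_cases hc : cur + pvTok s ≤ m
    · right
      have hcnt : pvCnt m (s :: rest) cur = pvCnt m rest (cur + pvTok s) + 1 := by
        simp [pvCnt, hc]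
      rw [hcnt, pvQ_cons]
      simp only [List.getD_cons_succ]
      rcases ih (cur + pvTok s) with h0 | hle
      · rw [h0, pvQ_getD_zero]; exact hc
      · exact hle
    · left; simp [pvCnt, hc]

theorem pvCnt_bad (m : Int) (ctx : List String) : ∀ cur, pvCnt m ctx cur < ctx.length →
    m < (pvQ cur ctx).getD (pvCnt m ctx cur + 1) 0 := by
  induction ctx with
  | nil => intro cur h; simp [pvCnt] at h
  | cons s rest ih =>
    intro cur h
    rw [pvQ_cons]
    by_cases hc : cur + pvTok s ≤ m
    · have hcnt : pvCnt m (s :: rest) cur = pvCnt m rest (cur + pvTok s) + 1 := by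
        simp [pvCnt, hc]
      rw [hcnt] at h ⊢
      simp only [List.getD_cons_succ]
      exact ih (cur + pvTok s) (by simpa using h)
    · have hcnt : pvCnt m (s :: rest) cur = 0 := by simp [pvCnt, hc]
      rw [hcnt]
      simp only [List.getD_cons_succ, pvQ_getD_zero]
      omega

-- binary-search correctness, by strong induction on hi - lo
theorem pvBS_correct (P : List Int) (m : Int) (n : Nat)
    (hmono : ∀ i j : Nat, i ≤ j → j ≤ n → P.getD i 0 ≤ P.getD j 0) :
    ∀ d lo hi, hi - lo ≤ d → lo ≤ hi → hi ≤ n →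
    (lo = 0 ∨ P.getD lo 0 ≤ m) → (∀ j, hi < j → j ≤ n → m < P.getD j 0) →
    (pvBS P m lo hi ≤ n ∧
     (pvBS P m lo hi = 0 ∨ P.getD (pvBS P m lo hi) 0 ≤ m) ∧
     (∀ j, pvBS P m lo hi < j → j ≤ n → m < P.getD j 0)) := by
  intro d
  induction d with
  | zero =>
    intro lo hi hd hle hn hg hb
    have : lo = hi := by omega
    rw [pvBS]
    simp only [this, lt_irrefl, if_false]
    exact ⟨by omega, by subst this; exact hg, by subst this; exact hb⟩
  | succ d ih =>
    intro lo hi hd hle hn hg hb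
    rw [pvBS]
    by_cases hlt : lo < hi
    · simp only [hlt, if_true]
      have hmid1 : lo < (lo + hi + 1) / 2 := by omega
      have hmid2 : (lo + hi + 1) / 2 ≤ hi := by omega
      by_cases hc : P.getD ((lo + hi + 1) / 2) 0 ≤ m
      · simp only [hc, if_pos]
        exact ih _ _ (by omega) (by omega) hn (Or.inr hc) hb
      · simp only [hc, if_neg, not_false_iff]
        refine ih _ _ (by omega) (by omega) (by omega) hg ?_
        intro j hj hjn
        by_cases hjh : hi < j
        · exact hb j hjh hjn
        · have : (lo + hi + 1) / 2 ≤ j := by omega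
          have := hmono _ _ this hjn
          omega
    · simp only [hlt, if_false]
      have : lo = hi := by omega
      exact ⟨by omega, by subst this; exact hg, by subst this; exact hb⟩

-- the two characterizations pin down the same count
theorem pvCount_unique (P : List Int) (m : Int) (n : Nat)
    (_hmono : ∀ i j : Nat, i ≤ j → j ≤ n → P.getD i 0 ≤ P.getD j 0)
    (k₁ k₂ : Nat)
    (h₁ : k₁ ≤ n ∧ (k₁ = 0 ∨ P.getD k₁ 0 ≤ m) ∧ (∀ j, k₁ < j → j ≤ n → m < P.getD j 0))
    (h₂ : k₂ ≤ n ∧ (k₂ = 0 ∨ P.getD k₂ 0 ≤ m) ∧ (∀ j, k₂ < j → j ≤ n → m < P.getD j 0)) :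
    k₁ = k₂ := by
  by_contra hne
  rcases Nat.lt_or_ge k₁ k₂ with h | h
  · have hbad := h₁.2.2 k₂ h h₂.1
    rcases h₂.2.1 with h0 | hle
    · omega
    · omega
  · have h' : k₂ < k₁ := by omega
    have hbad := h₂.2.2 k₁ h' h₁.1
    rcases h₁.2.1 with h0 | hle
    · omega
    · omega

-- ===== VERDICT (by name: the statement is the Claim_ definition above) =====
theorem simple_compression_py_spec : Claim_equal_simple_compression_py := by
  intro context max_tokens _
  unfold Spec_simple_compression_py simple_compression_py simple_compression_py_alt
  rw [pvGoA_take]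
  have hP : pvPrefixB context = pvQ 0 context := rfl
  set n := context.length with hn
  have hmono : ∀ i j : Nat, i ≤ j → j ≤ n → (pvQ 0 context).getD i 0 ≤ (pvQ 0 context).getD j 0 :=
    fun i j hij hj => pvQ_mono context 0 i j hij hj
  have hbs := pvBS_correct (pvQ 0 context) max_tokens n hmono n 0 n (by omega) (by omega)
    (le_refl n) (Or.inl rfl)
    (by
      intro j hj hjn; omega)
  have hcnt : pvCnt max_tokens context 0 ≤ n ∧
      (pvCnt max_tokens context 0 = 0 ∨ (pvQ 0 context).getD (pvCnt max_tokens context 0) 0 ≤ max_tokens) ∧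
      (∀ j, pvCnt max_tokens context 0 < j → j ≤ n → max_tokens < (pvQ 0 context).getD j 0) := by
    refine ⟨pvCnt_le _ _ _, pvCnt_good _ _ _, ?_⟩
    intro j hj hjn
    have hb := pvCnt_bad max_tokens context 0
    have hlt : pvCnt max_tokens context 0 < n := by omega
    have := hb hlt
    have hmono' := hmono (pvCnt max_tokens context 0 + 1) j (by omega) hjn
    omega
  rw [hP]
  rw [pvCount_unique (pvQ 0 context) max_tokens n hmono _ _ hcnt hbs]
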